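-- pv_equiv track=rewrite | github.com/Avy-Dawgs/Avy-Dawgs-simulation | mavlink_test.py | gen_position_list
-- ===== SOURCE A (Python) =====
-- from typing import Tuple
--
-- def gen_position_list(NumPasses: int, Length: int, Width: int) -> list[Tuple]:
--     '''
--     Generate a list of points (x, y)
--     '''
--     retval = []
--     coor = (0, 0)
--
--     for _ in range (int(NumPasses / 2)):
--         # up
--         coor = (coor[0] + Length, coor[1])
--         retval.append(coor)
--
--         coor = (coor[0], coor[1] + Width)
--         retval.append(coor)
--
--         coor = (coor[0] - Length, coor[1])
--         retval.append(coor)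
--
--         coor = (coor[0], coor[1] + Width)
--         retval.append(coor)
--
--     return retval
-- ===== SOURCE B (Python) =====
-- def gen_position_list(NumPasses: int, Length: int, Width: int) -> list:
--     '''
--     Generate a list of points (x, y)
--     '''
--     n = NumPasses // 2 if NumPasses > 0 else 0
--     return [(Length if i % 4 < 2 else 0, (2 * (i // 4) + (i % 4 + 1) // 2) * Width)
--             for i in range(4 * n)]
-- ===== Notes on version B (the rewrite author's own statement) =====
-- stated objective: simpler
-- what changed: Replaces the stateful loop threading a mutable coor accumulator with a single comprehension computing each point directly from its flat index via closed-form i//4 and i%4 arithmetic.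
import Mathlib
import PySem

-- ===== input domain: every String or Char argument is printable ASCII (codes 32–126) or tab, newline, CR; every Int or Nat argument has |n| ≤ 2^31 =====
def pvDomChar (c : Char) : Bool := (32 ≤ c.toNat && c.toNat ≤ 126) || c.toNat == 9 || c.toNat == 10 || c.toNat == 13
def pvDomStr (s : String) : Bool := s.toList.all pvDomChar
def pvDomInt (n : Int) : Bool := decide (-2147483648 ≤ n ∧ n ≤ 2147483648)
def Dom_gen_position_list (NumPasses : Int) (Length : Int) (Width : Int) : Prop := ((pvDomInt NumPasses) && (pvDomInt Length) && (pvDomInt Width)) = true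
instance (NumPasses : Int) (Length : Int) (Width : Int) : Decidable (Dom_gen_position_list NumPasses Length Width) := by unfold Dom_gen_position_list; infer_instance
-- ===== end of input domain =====

-- B replaces A's mutable-coordinate stepping loop with a comprehension computing each point from its flat index (simpler decomposition).

-- ===== PORT A =====
-- A's loop body: four coor updates, each appended to retval; state = (retval, coor).
def gen_position_list_body (Length Width : Int)
    (st : List (Int × Int) × (Int × Int)) : List (Int × Int) × (Int × Int) :=
  let retval := st.1
  let coor := st.2
  let c1 := (coor.1 + Length, coor.2)
  let c2 := (c1.1, c1.2 + Width)
  let c3 := (c2.1 - Length, c2.2)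
  let c4 := (c3.1, c3.2 + Width)
  (retval ++ [c1, c2, c3, c4], c4)

def gen_position_list (NumPasses : Int) (Length : Int) (Width : Int) : List (Int × Int) :=
  -- int(NumPasses / 2) truncates toward zero: PySem.Int.truncdiv (exact here, |NumPasses| ≤ 2^31 < 2^53)
  ((PySem.List.pyRange 0 (PySem.Int.truncdiv NumPasses 2) 1).foldl
    (fun st _ => gen_position_list_body Length Width st)
    ([], (0, 0))).1

-- ===== PORT B =====
def gen_position_list_alt_pt (Length Width : Int) (i : Int) : Int × Int :=
  (if PySem.Int.mod i 4 < 2 then Length else 0,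
   (2 * PySem.Int.floordiv i 4 + PySem.Int.floordiv (PySem.Int.mod i 4 + 1) 2) * Width)

def gen_position_list_alt (NumPasses : Int) (Length : Int) (Width : Int) : List (Int × Int) :=
  let n : Int := if NumPasses > 0 then PySem.Int.floordiv NumPasses 2 else 0
  (PySem.List.pyRange 0 (4 * n) 1).map (gen_position_list_alt_pt Length Width)

-- ===== PRECONDITION & SPEC =====
def Spec_gen_position_list (NumPasses : Int) (Length : Int) (Width : Int) (out : List (Int × Int)) : Prop := out = gen_position_list_alt NumPasses Length Width
instance (NumPasses : Int) (Length : Int) (Width : Int) (out : List (Int × Int)) : Decidable (Spec_gen_position_list NumPasses Length Width out) := by unfold Spec_gen_position_list; infer_instance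

-- ===== CLAIM (what is proved, stated in full; the proofs are below) =====
def Claim_equal_gen_position_list : Prop := ∀ (NumPasses : Int) (Length : Int) (Width : Int), Dom_gen_position_list NumPasses Length Width → Spec_gen_position_list NumPasses Length Width (gen_position_list NumPasses Length Width)

-- ===== LEMMAS AND PROOFS =====

-- closed forms of B's point function at the four phases of pass m
lemma alt_pt_phase0 (L W : Int) (m : Nat) :
    gen_position_list_alt_pt L W (4 * (m : Int)) = (L, 2 * (m : Int) * W) := by
  simp [gen_position_list_alt_pt, Int.mul_emod_right]

lemma alt_pt_phase1 (L W : Int) (m : Nat) :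
    gen_position_list_alt_pt L W (4 * (m : Int) + 1) = (L, (2 * (m : Int) + 1) * W) := by
  have hm : (4 * (m : Int) + 1) % 4 = 1 := by omega
  have hd : (4 * (m : Int) + 1) / 4 = (m : Int) := by omega
  simp [gen_position_list_alt_pt, hm, hd]

lemma alt_pt_phase2 (L W : Int) (m : Nat) :
    gen_position_list_alt_pt L W (4 * (m : Int) + 2) = (0, (2 * (m : Int) + 1) * W) := by
  have hm : (4 * (m : Int) + 2) % 4 = 2 := by omega
  have hd : (4 * (m : Int) + 2) / 4 = (m : Int) := by omega
  simp [gen_position_list_alt_pt, hm, hd]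

lemma alt_pt_phase3 (L W : Int) (m : Nat) :
    gen_position_list_alt_pt L W (4 * (m : Int) + 3) = (0, (2 * (m : Int) + 2) * W) := by
  have hm : (4 * (m : Int) + 3) % 4 = 3 := by omega
  have hd : (4 * (m : Int) + 3) / 4 = (m : Int) := by omega
  simp [gen_position_list_alt_pt, hm, hd]

-- A's loop over m passes equals B's map over the flat range of 4*m indices,
-- and the coordinate after m passes is (0, 2*m*Width).
lemma loop_eq_map (L W : Int) (m : Nat) :
    (PySem.List.pyRange 0 (m : Int) 1).foldl
      (fun st _ => gen_position_list_body L W st) ([], (0, 0))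
    = ((PySem.List.pyRange 0 (4 * (m : Int)) 1).map (gen_position_list_alt_pt L W),
       (0, 2 * (m : Int) * W)) := by
  induction m with
  | zero => simp [PySem.List.pyRange_one_eq_nil]
  | succ k ih =>
    have hk : (0 : Int) ≤ (k : Int) := by positivity
    have hsucc : ((k : Int) + 1) = ((k + 1 : Nat) : Int) := by push_cast; ring
    have hA : PySem.List.pyRange 0 ((k + 1 : Nat) : Int) 1
        = PySem.List.pyRange 0 (k : Int) 1 ++ [(k : Int)] := by
      rw [← hsucc]; exact PySem.List.pyRange_one_succ_right hk
    have step : ∀ (j : Nat) (h : (0:Int) ≤ 4 * (j:Int)),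
        PySem.List.pyRange 0 (4 * (j : Int) + 1) 1
        = PySem.List.pyRange 0 (4 * (j : Int)) 1 ++ [4 * (j : Int)] := by
      intro j h; exact PySem.List.pyRange_one_succ_right h
    have h0 : (0:Int) ≤ 4 * (k:Int) := by positivity
    have hB : PySem.List.pyRange 0 (4 * ((k + 1 : Nat) : Int)) 1
        = PySem.List.pyRange 0 (4 * (k : Int)) 1
          ++ [4 * (k : Int), 4 * (k : Int) + 1, 4 * (k : Int) + 2, 4 * (k : Int) + 3] := by
      have e1 : 4 * ((k + 1 : Nat) : Int) = (4 * (k : Int) + 3) + 1 := by push_cast; ring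
      rw [e1, PySem.List.pyRange_one_succ_right (by omega),
          show (4 * (k : Int) + 3) = (4 * (k : Int) + 2) + 1 by ring,
          PySem.List.pyRange_one_succ_right (by omega),
          show (4 * (k : Int) + 2) = (4 * (k : Int) + 1) + 1 by ring,
          PySem.List.pyRange_one_succ_right (by omega),
          PySem.List.pyRange_one_succ_right h0]
      simp
    rw [hA, List.foldl_append, ih, hB]
    simp only [List.foldl_cons, List.foldl_nil, List.map_append, List.map_cons, List.map_nil,
      alt_pt_phase0, alt_pt_phase1, alt_pt_phase2, alt_pt_phase3, gen_position_list_body]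
    simp only [Prod.ext_iff, List.append_right_inj, List.cons.injEq, and_true]
    push_cast
    ring_nf
    simp

-- the two versions of "number of passes" agree
lemma passes_eq (NumPasses : Int) (h : -2147483648 ≤ NumPasses ∧ NumPasses ≤ 2147483648) :
    ∃ m : Nat,
      PySem.List.pyRange 0 (PySem.Int.truncdiv NumPasses 2) 1 = PySem.List.pyRange 0 (m : Int) 1
      ∧ (if NumPasses > 0 then PySem.Int.floordiv NumPasses 2 else 0) = (m : Int) := by
  by_cases hpos : NumPasses > 0
  · refine ⟨(NumPasses / 2).toNat, ?_, ?_⟩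
    · rw [show PySem.Int.truncdiv NumPasses 2 = NumPasses / 2 from
        Int.tdiv_eq_ediv_of_nonneg (by omega)]
      congr 1; omega
    · rw [if_pos hpos, PySem.Int.floordiv_eq_ediv_of_pos (by norm_num)]; omega
  · refine ⟨0, ?_, by simp [hpos]⟩
    have ht : PySem.Int.truncdiv NumPasses 2 ≤ 0 := by
      have h1 : NumPasses.tdiv 2 = -((-NumPasses).tdiv 2) := by
        rw [← Int.neg_tdiv]; ring_nf
      have h2 : (-NumPasses).tdiv 2 = (-NumPasses) / 2 := Int.tdiv_eq_ediv_of_nonneg (by omega)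
      show NumPasses.tdiv 2 ≤ 0
      rw [h1, h2]; omega
    rw [PySem.List.pyRange_one_eq_nil ht, PySem.List.pyRange_one_eq_nil (by norm_num)]

-- ===== VERDICT (by name: the statement is the Claim_ definition above) =====
theorem gen_position_list_spec : Claim_equal_gen_position_list := by
  intro NumPasses Length Width hdom
  have hbound : -2147483648 ≤ NumPasses ∧ NumPasses ≤ 2147483648 := by
    simp [Dom_gen_position_list, pvDomInt] at hdom; exact hdom.1.1
  obtain ⟨m, hA, hB⟩ := passes_eq NumPasses hbound
  show gen_position_list NumPasses Length Width = gen_position_list_alt NumPasses Length Width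
  unfold gen_position_list gen_position_list_alt
  rw [hA, hB, loop_eq_map]
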